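-- pv_equiv track=rewrite | github.com/Ag3497120/verantyx-v6 | arc/world_commands.py | sym_center_point
-- ===== SOURCE A (Python) =====
-- from collections import Counter, defaultdict
--
-- def _bg(g):
--     c = Counter()
--     for row in g: c.update(row)
--     return c.most_common(1)[0][0]
--
-- def _copy(g):
--     return [row[:] for row in g]
--
-- def sym_center_point(g):
--     """中心点対称修復"""
--     bg=_bg(g); h,w=len(g),len(g[0]); res=_copy(g)
--     for r in range(h):
--         for c in range(w):
--             mr,mc=h-1-r,w-1-c
--             if res[r][c]==bg and res[mr][mc]!=bg: res[r][c]=res[mr][mc]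
--             elif res[mr][mc]==bg and res[r][c]!=bg: res[mr][mc]=res[r][c]
--     return res
-- ===== SOURCE B (Python) =====
-- from collections import Counter
--
-- def _bg(g):
--     c = Counter()
--     for row in g: c.update(row)
--     return c.most_common(1)[0][0]
--
-- def sym_center_point(g):
--     """中心点対称修復: fill each background cell from its 180°-mirror cell of the original grid."""
--     bg = _bg(g)
--     h, w = len(g), len(g[0])
--     out = [row[:] for row in g]
--     for r in range(h):
--         for c in range(w):
--             if out[r][c] == bg:
--                 out[r][c] = g[h-1-r][w-1-c]
--     return out
-- ===== Notes on version B (the rewrite author's own statement) =====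
-- stated objective: simpler
-- what changed: Replaces A's in-place two-sided mutation with an elif over mirror index pairs by a single-branch pure rule: write into a fresh copy, filling each background cell from the 180-degree mirror cell of the ORIGINAL grid (the collapse is exact because A's writes only ever depend on original values); Pre_ excludes only the inputs on which A raises IndexError (grids with no nonempty row, or a row shorter than the first row).
import Mathlib
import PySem

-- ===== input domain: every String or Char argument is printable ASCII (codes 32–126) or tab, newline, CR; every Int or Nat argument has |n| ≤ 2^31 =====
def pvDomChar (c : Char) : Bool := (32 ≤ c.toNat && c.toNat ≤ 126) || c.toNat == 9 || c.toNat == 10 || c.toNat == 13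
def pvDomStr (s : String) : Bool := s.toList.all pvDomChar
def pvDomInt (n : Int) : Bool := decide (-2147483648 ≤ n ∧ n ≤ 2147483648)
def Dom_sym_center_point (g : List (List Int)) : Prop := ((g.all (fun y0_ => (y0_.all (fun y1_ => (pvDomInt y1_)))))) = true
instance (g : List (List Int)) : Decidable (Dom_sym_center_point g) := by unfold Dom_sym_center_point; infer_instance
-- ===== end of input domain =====

-- B replaces A's in-place two-sided mirror mutation with a pure elementwise rule over the
-- explicit 180°-rotated grid (objective: simpler). Return values only; neither version mutates its argument.

-- ===== PORT A =====
-- _bg(g): a Counter updated row by row; most_common(1)[0][0] is the first key (in first-insertion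
-- order) with maximal count, i.e. PySem.List.max? over the counter's items keyed by the count.
def pvCnt (g : List (List Int)) : PySem.Dict Int Int :=
  g.foldl (fun d row => row.foldl (fun d x => PySem.Dict.modify d x 0 (· + 1)) d)
    PySem.Dict.empty

def pvBg? (g : List (List Int)) : Option Int :=
  (PySem.List.max? (pvCnt g).items (fun p => p.2)).map (·.1)

-- res[r][c] read / write (the indices produced by range(h)/range(w) are nonnegative and in range on Pre_)
def pvGGet (res : List (List Int)) (r c : Int) : Int :=
  PySem.List.pyGetD (PySem.List.pyGetD res r []) c 0

def pvGSet (res : List (List Int)) (r c : Int) (v : Int) : List (List Int) :=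
  res.modify r.toNat (fun row => row.set c.toNat v)

-- the body of A's inner loop, verbatim
def pvStepA (bg h w : Int) (res : List (List Int)) (r c : Int) : List (List Int) :=
  let mr := h - 1 - r
  let mc := w - 1 - c
  if pvGGet res r c = bg ∧ pvGGet res mr mc ≠ bg then pvGSet res r c (pvGGet res mr mc)
  else if pvGGet res mr mc = bg ∧ pvGGet res r c ≠ bg then pvGSet res mr mc (pvGGet res r c)
  else res

def sym_center_point (g : List (List Int)) : List (List Int) :=
  match pvBg? g, PySem.List.pyGet? g 0 with
  | some bg, some row0 =>
    let h : Int := g.length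
    let w : Int := row0.length
    (PySem.List.pyRange 0 h 1).foldl (fun res r =>
      (PySem.List.pyRange 0 w 1).foldl (fun res c => pvStepA bg h w res r c) res) g
  | _, _ => []

-- ===== PORT B =====
-- the body of B's inner loop: single branch, reads the mirror cell of the ORIGINAL grid g
def pvStepB (g : List (List Int)) (bg h w : Int) (out : List (List Int)) (r c : Int) : List (List Int) :=
  if pvGGet out r c = bg then pvGSet out r c (pvGGet g (h - 1 - r) (w - 1 - c)) else out

def sym_center_point_alt (g : List (List Int)) : List (List Int) :=
  match pvBg? g with
  | none => []
  | some bg =>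
    match PySem.List.pyGet? g 0 with
    | none => []
    | some row0 =>
      let h : Int := g.length
      let w : Int := row0.length
      (PySem.List.pyRange 0 h 1).foldl (fun out r =>
        (PySem.List.pyRange 0 w 1).foldl (fun out c => pvStepB g bg h w out r c) out) g

-- ===== PRECONDITION & SPEC =====
-- Pre_ holds exactly where A returns normally: it excludes only the inputs on which A raises
-- IndexError — grids with no nonempty row (most_common(1)[0][0] of an empty Counter) and grids
-- in which some row is shorter than the first row (mirror indexing past that row's end).
def Pre_sym_center_point (g : List (List Int)) : Prop :=
  (∃ row ∈ g, row ≠ []) ∧ ∀ row ∈ g, (g.headD []).length ≤ row.length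
instance (g : List (List Int)) : Decidable (Pre_sym_center_point g) := by
  unfold Pre_sym_center_point; infer_instance

def pvWitness_sym_center_point : List (List Int) := [[1, 0], [0, 2]]

def Spec_sym_center_point (g : List (List Int)) (out : List (List Int)) : Prop :=
  out = sym_center_point_alt g
instance (g : List (List Int)) (out : List (List Int)) : Decidable (Spec_sym_center_point g out) := by
  unfold Spec_sym_center_point; infer_instance

-- ===== CLAIM (what is proved, stated in full; the proofs are below) =====
def Claim_equal_sym_center_point : Prop := ∀ (g : List (List Int)), Dom_sym_center_point g →
  Pre_sym_center_point g → Spec_sym_center_point g (sym_center_point g)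

-- ===== LEMMAS AND PROOFS =====

-- the intended value of cell (r, c): keep it if it is not background, else take g's mirror cell
def pvOut (g : List (List Int)) (bg : Int) (hN wN r c : Nat) : Int :=
  if (g.getD r []).getD c 0 ≠ bg then (g.getD r []).getD c 0
  else (g.getD (hN - 1 - r) []).getD (wN - 1 - c) 0

-- loop invariant: rows keep their lengths, a cell in the mirrored band holds its intended value
-- iff it or its mirror cell has been processed (S = processed index pairs; only membership
-- matters), and cells at column ≥ wN are never touched
def pvInv (g : List (List Int)) (bg : Int) (hN wN : Nat) (S : List (Nat × Nat))
    (res : List (List Int)) : Prop :=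
  res.map List.length = g.map List.length ∧
  (∀ r c : Nat, r < hN → c < wN →
    (res.getD r []).getD c 0 =
      if (r, c) ∈ S ∨ (hN - 1 - r, wN - 1 - c) ∈ S then pvOut g bg hN wN r c
      else (g.getD r []).getD c 0) ∧
  (∀ r c : Nat, wN ≤ c → (res.getD r []).getD c 0 = (g.getD r []).getD c 0)

theorem pvBg?_isSome (g : List (List Int)) (hex : ∃ row ∈ g, row ≠ []) :
    ∃ bg, pvBg? g = some bg := by
  unfold pvBg?
  have hcnt : pvCnt g = PySem.Dict.counter g.flatten := by
    rw [PySem.Dict.counter_eq_foldl, pvCnt, List.foldl_flatten]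
  rw [hcnt, PySem.Dict.items_counter]
  have hflat : g.flatten ≠ [] := by
    obtain ⟨row, hrow, hne⟩ := hex
    obtain ⟨y, hy⟩ := List.exists_mem_of_ne_nil _ hne
    exact List.ne_nil_of_mem (List.mem_flatten.2 ⟨row, hrow, hy⟩)
  obtain ⟨x, hx⟩ := List.exists_mem_of_ne_nil _ hflat
  have hxs : x ∈ PySem.Set.ofList g.flatten := (PySem.Set.mem_ofList _ _).2 hx
  have hne2 : (PySem.Set.ofList g.flatten).map (fun k => (k, (List.count k g.flatten : Int))) ≠ [] := by
    intro h
    rw [List.map_eq_nil_iff] at h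
    rw [h] at hxs
    simp at hxs
  cases hmax : PySem.List.max? ((PySem.Set.ofList g.flatten).map
      (fun k => (k, (List.count k g.flatten : Int)))) (fun p => p.2) with
  | none => exact absurd ((PySem.List.max?_eq_none_iff _ _).1 hmax) hne2
  | some m => exact ⟨m.1, by simp [hmax]⟩

theorem pvMapLen_gset (res : List (List Int)) (r c : Nat) (v : Int) :
    (pvGSet res (r : Int) (c : Int) v).map List.length = res.map List.length := by
  unfold pvGSet
  simp only [Int.toNat_natCast]
  apply List.ext_getElem
  · simp
  · intro i h1 h2
    simp only [List.getElem_map, List.getElem_modify]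
    split <;> simp

theorem pvGet_gset (res : List (List Int)) (r c : Nat) (v : Int) (x y : Nat)
    (hr : r < res.length) (hc : c < (res.getD r []).length) :
    ((pvGSet res (r : Int) (c : Int) v).getD x []).getD y 0 =
      if x = r ∧ y = c then v else (res.getD x []).getD y 0 := by
  unfold pvGSet
  simp only [Int.toNat_natCast, List.getD_eq_getElem?_getD, List.getElem?_modify]
  by_cases hx : x = r
  · subst hx
    rw [List.getElem?_eq_getElem hr]
    have hc' : c < res[x].length := by
      rw [List.getD_eq_getElem _ _ hr] at hc
      exact hc
    by_cases hy : c = y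
    · subst hy
      simp [List.getElem?_set, hc']
    · simp [List.getElem?_set, hy, Ne.symm hy]
  · have h1 : ¬ (x = r ∧ y = c) := fun h => hx h.1
    have h2 : r ≠ x := fun h => hx h.symm
    rw [if_neg h1]
    cases hres : res[x]? with
    | none => simp [hres]
    | some row => simp [hres, h2]

theorem pvGGet_natCast (res : List (List Int)) (r c : Nat) :
    pvGGet res (r : Int) (c : Int) = (res.getD r []).getD c 0 := by
  simp [pvGGet]

theorem pvRowLen (g res : List (List Int))
    (hsh : res.map List.length = g.map List.length) (r : Nat) :
    (res.getD r []).length = (g.getD r []).length := by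
  have hlen : res.length = g.length := by simpa using congrArg List.length hsh
  rcases Nat.lt_or_ge r g.length with hr | hr
  · rw [List.getD_eq_getElem _ _ (show r < res.length by omega), List.getD_eq_getElem _ _ hr]
    have h2 : (res.map List.length).getD r 0 = (g.map List.length).getD r 0 := by rw [hsh]
    rwa [List.getD_eq_getElem _ _ (by simpa using (show r < res.length by omega)),
        List.getD_eq_getElem _ _ (by simpa using hr), List.getElem_map, List.getElem_map] at h2
  · rw [List.getD_eq_getElem?_getD, List.getD_eq_getElem?_getD,
        List.getElem?_eq_none (by omega), List.getElem?_eq_none (by omega)]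

set_option maxHeartbeats 2000000 in
theorem pvStepA_inv (g : List (List Int)) (bg : Int) (hN wN : Nat)
    (hh : hN = g.length) (hrow : ∀ row ∈ g, wN ≤ row.length)
    (S : List (Nat × Nat)) (res : List (List Int))
    (hInv : pvInv g bg hN wN S res) (r c : Nat) (hr : r < hN) (hc : c < wN) :
    pvInv g bg hN wN (S ++ [(r, c)]) (pvStepA bg (hN : Int) (wN : Int) res (r : Int) (c : Int)) := by
  obtain ⟨hsh, hval, htail⟩ := hInv
  have hreslen : res.length = g.length := by simpa using congrArg List.length hsh
  have hglen : ∀ x : Nat, x < hN → wN ≤ (g.getD x []).length := by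
    intro x hx
    rw [List.getD_eq_getElem _ _ (show x < g.length by omega)]
    exact hrow _ (List.getElem_mem _)
  have hrl : ∀ x : Nat, (res.getD x []).length = (g.getD x []).length :=
    fun x => pvRowLen g res hsh x
  have hmrlt : hN - 1 - r < hN := by omega
  have hmclt : wN - 1 - c < wN := by omega
  have hcast1 : (hN : Int) - 1 - (r : Int) = ((hN - 1 - r : Nat) : Int) := by push_cast; omega
  have hcast2 : (wN : Int) - 1 - (c : Int) = ((wN - 1 - c : Nat) : Int) := by push_cast; omega
  have ha := hval r c hr hc
  have hb := hval (hN - 1 - r) (wN - 1 - c) hmrlt hmclt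
  have hm1 : hN - 1 - (hN - 1 - r) = r := by omega
  have hm2 : wN - 1 - (wN - 1 - c) = c := by omega
  rw [hm1, hm2] at hb
  have hmemS' : ∀ (x y : Nat), ((x, y) ∈ S ++ [(r, c)]) ↔ ((x, y) ∈ S ∨ (x = r ∧ y = c)) := by
    intro x y; simp [List.mem_append, Prod.ext_iff]
  have hmirdet : ∀ x y : Nat, x < hN → y < wN →
      ((hN - 1 - x = r ∧ wN - 1 - y = c) ↔ (x = hN - 1 - r ∧ y = wN - 1 - c)) := by
    intro x y hx hy; omega
  unfold pvStepA
  rw [hcast1, hcast2]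
  simp only [pvGGet_natCast]
  set gr := (g.getD r []).getD c 0 with hgr
  set gm := (g.getD (hN - 1 - r) []).getD (wN - 1 - c) 0 with hgm
  have hOr : pvOut g bg hN wN r c = if gr ≠ bg then gr else gm := rfl
  have hOm : pvOut g bg hN wN (hN - 1 - r) (wN - 1 - c) = if gm ≠ bg then gm else gr := by
    unfold pvOut
    rw [hm1, hm2]
  by_cases hQ : (r, c) ∈ S ∨ (hN - 1 - r, wN - 1 - c) ∈ S
  · -- the pair was already processed: the step makes no write
    rw [if_pos hQ] at ha
    rw [if_pos (by tauto)] at hb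
    have hnowrite1 : ¬ ((res.getD r []).getD c 0 = bg ∧
        (res.getD (hN - 1 - r) []).getD (wN - 1 - c) 0 ≠ bg) := by
      rintro ⟨h1, h2⟩
      rw [ha, hOr] at h1
      rw [hb, hOm] at h2
      split_ifs at h1 with hg1
      · exact hg1 h1
      · push_neg at hg1
        rw [if_neg (by simpa [h1] using hg1)] at h2
        exact h2 hg1
    have hnowrite2 : ¬ ((res.getD (hN - 1 - r) []).getD (wN - 1 - c) 0 = bg ∧
        (res.getD r []).getD c 0 ≠ bg) := by
      rintro ⟨h1, h2⟩
      rw [hb, hOm] at h1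
      rw [ha, hOr] at h2
      split_ifs at h1 with hg1
      · exact hg1 h1
      · push_neg at hg1
        rw [if_neg (by simpa [h1] using hg1)] at h2
        exact h2 hg1
    rw [if_neg hnowrite1, if_neg hnowrite2]
    refine ⟨hsh, ?_, htail⟩
    intro x y hx hy
    rw [hval x y hx hy]
    have hcond : (((x, y) ∈ S ++ [(r, c)] ∨ (hN - 1 - x, wN - 1 - y) ∈ S ++ [(r, c)])) ↔
        ((x, y) ∈ S ∨ (hN - 1 - x, wN - 1 - y) ∈ S) := by
      rw [hmemS', hmemS']
      constructor
      · rintro (h | h)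
        · rcases h with h | ⟨h1, h2⟩
          · exact Or.inl h
          · subst h1; subst h2; exact hQ
        · rcases h with h | h
          · exact Or.inr h
          · rw [hmirdet x y hx hy] at h
            obtain ⟨h1, h2⟩ := h; subst h1; subst h2
            rw [hm1, hm2]
            tauto
      · tauto
    by_cases h : (x, y) ∈ S ∨ (hN - 1 - x, wN - 1 - y) ∈ S
    · rw [if_pos h, if_pos (hcond.2 h)]
    · rw [if_neg h, if_neg (fun hh2 => h (hcond.1 hh2))]
  · -- first visit of the pair: res still holds g's values at both cells
    rw [if_neg hQ] at ha
    rw [if_neg (by tauto)] at hb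
    have hval' : ∀ x y : Nat, x < hN → y < wN → ¬ (x = r ∧ y = c) →
        ¬ (x = hN - 1 - r ∧ y = wN - 1 - c) →
        ((res.getD x []).getD y 0 =
          if (x, y) ∈ S ++ [(r, c)] ∨ (hN - 1 - x, wN - 1 - y) ∈ S ++ [(r, c)]
          then pvOut g bg hN wN x y else (g.getD x []).getD y 0) := by
      intro x y hx hy hne1 hne2
      rw [hval x y hx hy]
      have hcond : (((x, y) ∈ S ++ [(r, c)] ∨ (hN - 1 - x, wN - 1 - y) ∈ S ++ [(r, c)])) ↔
          ((x, y) ∈ S ∨ (hN - 1 - x, wN - 1 - y) ∈ S) := by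
        rw [hmemS', hmemS', hmirdet x y hx hy]
        tauto
      by_cases h : (x, y) ∈ S ∨ (hN - 1 - x, wN - 1 - y) ∈ S
      · rw [if_pos h, if_pos (hcond.2 h)]
      · rw [if_neg h, if_neg (fun hh2 => h (hcond.1 hh2))]
    have hrin : r < res.length := by omega
    have hmrin : hN - 1 - r < res.length := by omega
    have hcin : c < (res.getD r []).length := by
      rw [hrl r]
      have := hglen r hr
      omega
    have hmcin : wN - 1 - c < (res.getD (hN - 1 - r) []).length := by
      rw [hrl _]
      have := hglen _ hmrlt
      omega
    have hcondrc : ((r, c) ∈ S ++ [(r, c)] ∨ (hN - 1 - r, wN - 1 - c) ∈ S ++ [(r, c)]) :=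
      Or.inl ((hmemS' r c).2 (Or.inr ⟨rfl, rfl⟩))
    have hcondm : ((hN - 1 - r, wN - 1 - c) ∈ S ++ [(r, c)] ∨
        (hN - 1 - (hN - 1 - r), wN - 1 - (wN - 1 - c)) ∈ S ++ [(r, c)]) := by
      rw [hm1, hm2]
      exact Or.inr ((hmemS' r c).2 (Or.inr ⟨rfl, rfl⟩))
    split_ifs with h1 h2
    · -- write res[r][c] := res[mr][mc]
      obtain ⟨h1a, h1b⟩ := h1
      rw [ha] at h1a
      rw [hb] at h1b
      refine ⟨by rw [pvMapLen_gset]; exact hsh, ?_, ?_⟩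
      · intro x y hx hy
        rw [hb, pvGet_gset res r c gm x y hrin hcin]
        by_cases hxy1 : x = r ∧ y = c
        · obtain ⟨e1, e2⟩ := hxy1; subst e1; subst e2
          rw [if_pos ⟨rfl, rfl⟩, if_pos hcondrc, hOr, if_neg (by simpa using h1a)]
        · rw [if_neg hxy1]
          by_cases hxy2 : x = hN - 1 - r ∧ y = wN - 1 - c
          · obtain ⟨e1, e2⟩ := hxy2; subst e1; subst e2
            rw [hb, if_pos hcondm, hOm, if_pos h1b]
          · exact hval' x y hx hy hxy1 hxy2
      · intro x y hy
        rw [hb, pvGet_gset res r c gm x y hrin hcin,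
          if_neg (by rintro ⟨-, e⟩; omega)]
        exact htail x y hy
    · -- write res[mr][mc] := res[r][c]
      obtain ⟨h2a, h2b⟩ := h2
      rw [hb] at h2a
      rw [ha] at h2b
      refine ⟨by rw [pvMapLen_gset]; exact hsh, ?_, ?_⟩
      · intro x y hx hy
        rw [ha, pvGet_gset res (hN - 1 - r) (wN - 1 - c) gr x y hmrin hmcin]
        by_cases hxy2 : x = hN - 1 - r ∧ y = wN - 1 - c
        · obtain ⟨e1, e2⟩ := hxy2; subst e1; subst e2
          rw [if_pos ⟨rfl, rfl⟩, if_pos hcondm, hOm, if_neg (by simpa using h2a)]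
        · rw [if_neg hxy2]
          by_cases hxy1 : x = r ∧ y = c
          · obtain ⟨e1, e2⟩ := hxy1; subst e1; subst e2
            rw [ha, if_pos hcondrc, hOr, if_pos h2b]
          · exact hval' x y hx hy hxy1 hxy2
      · intro x y hy
        rw [ha, pvGet_gset res (hN - 1 - r) (wN - 1 - c) gr x y hmrin hmcin,
          if_neg (by rintro ⟨-, e⟩; omega)]
        exact htail x y hy
    · -- no write: both cells already hold their intended values (both bg or both non-bg)
      rw [ha] at h1
      rw [hb] at h1 h2
      rw [ha] at h2
      refine ⟨hsh, ?_, htail⟩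
      intro x y hx hy
      by_cases hxy1 : x = r ∧ y = c
      · obtain ⟨e1, e2⟩ := hxy1; subst e1; subst e2
        rw [ha, if_pos hcondrc, hOr]
        by_cases hgrbg : gr = bg
        · have hgmbg : gm = bg := by
            by_contra hgm; exact h1 ⟨hgrbg, hgm⟩
          rw [if_neg (by simpa using hgrbg), hgrbg, hgmbg]
        · rw [if_pos hgrbg]
      · by_cases hxy2 : x = hN - 1 - r ∧ y = wN - 1 - c
        · obtain ⟨e1, e2⟩ := hxy2; subst e1; subst e2
          rw [hb, if_pos hcondm, hOm]
          by_cases hgmbg : gm = bg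
          · have hgrbg : gr = bg := by
              by_contra hgr; exact h2 ⟨hgmbg, hgr⟩
            rw [if_neg (by simpa using hgmbg), hgrbg, hgmbg]
          · rw [if_pos hgmbg]
        · exact hval' x y hx hy hxy1 hxy2

theorem pvFold_inv (g : List (List Int)) (bg : Int) (hN wN : Nat)
    (hh : hN = g.length) (hrow : ∀ row ∈ g, wN ≤ row.length) :
    ∀ (L : List (Nat × Nat)) (S : List (Nat × Nat)) (res : List (List Int)),
      pvInv g bg hN wN S res → (∀ p ∈ L, p.1 < hN ∧ p.2 < wN) →
      pvInv g bg hN wN (S ++ L)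
        (L.foldl (fun res p => pvStepA bg (hN : Int) (wN : Int) res (p.1 : Int) (p.2 : Int)) res) := by
  intro L
  induction L with
  | nil => intro S res h _; simpa using h
  | cons p L ih =>
    intro S res hInv hvalid
    have h1 := pvStepA_inv g bg hN wN hh hrow S res hInv p.1 p.2
      (hvalid p (by simp)).1 (hvalid p (by simp)).2
    have h2 := ih (S ++ [(p.1, p.2)]) _ h1 (fun q hq => hvalid q (by simp [hq]))
    simpa using h2

-- B-side invariant: rows keep their lengths, a processed cell of the band holds its intended
-- value, an unprocessed one still holds g's value, tail cells are never touched; revisiting a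
-- processed cell rewrites the same value, so no freshness hypothesis is needed
def pvInvB (g : List (List Int)) (bg : Int) (hN wN : Nat) (S : List (Nat × Nat))
    (out : List (List Int)) : Prop :=
  out.map List.length = g.map List.length ∧
  (∀ r c : Nat, r < hN → c < wN →
    (out.getD r []).getD c 0 =
      if (r, c) ∈ S then pvOut g bg hN wN r c else (g.getD r []).getD c 0) ∧
  (∀ r c : Nat, wN ≤ c → (out.getD r []).getD c 0 = (g.getD r []).getD c 0)

theorem pvStepB_inv (g : List (List Int)) (bg : Int) (hN wN : Nat)
    (hh : hN = g.length) (hrow : ∀ row ∈ g, wN ≤ row.length)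
    (S : List (Nat × Nat)) (out : List (List Int))
    (hInv : pvInvB g bg hN wN S out) (r c : Nat) (hr : r < hN) (hc : c < wN) :
    pvInvB g bg hN wN (S ++ [(r, c)])
      (pvStepB g bg (hN : Int) (wN : Int) out (r : Int) (c : Int)) := by
  obtain ⟨hsh, hval, htail⟩ := hInv
  have houtlen : out.length = g.length := by simpa using congrArg List.length hsh
  have hglen : ∀ x : Nat, x < hN → wN ≤ (g.getD x []).length := by
    intro x hx
    rw [List.getD_eq_getElem _ _ (show x < g.length by omega)]
    exact hrow _ (List.getElem_mem _)
  have hrl : ∀ x : Nat, (out.getD x []).length = (g.getD x []).length :=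
    fun x => pvRowLen g out hsh x
  have hcast1 : (hN : Int) - 1 - (r : Int) = ((hN - 1 - r : Nat) : Int) := by omega
  have hcast2 : (wN : Int) - 1 - (c : Int) = ((wN - 1 - c : Nat) : Int) := by omega
  have hrin : r < out.length := by omega
  have hcin : c < (out.getD r []).length := by
    rw [hrl r]
    have := hglen r hr
    omega
  have hmemS' : ∀ (x y : Nat), ((x, y) ∈ S ++ [(r, c)]) ↔ ((x, y) ∈ S ∨ (x = r ∧ y = c)) := by
    intro x y; simp [List.mem_append, Prod.ext_iff]
  have ha := hval r c hr hc
  set gr := (g.getD r []).getD c 0 with hgr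
  set gm := (g.getD (hN - 1 - r) []).getD (wN - 1 - c) 0 with hgm
  have hOr : pvOut g bg hN wN r c = if gr ≠ bg then gr else gm := rfl
  unfold pvStepB
  rw [hcast1, hcast2]
  simp only [pvGGet_natCast]
  have hsame : ∀ x y : Nat, x < hN → y < wN → ¬ (x = r ∧ y = c) →
      ((if (x, y) ∈ S ++ [(r, c)] then pvOut g bg hN wN x y else (g.getD x []).getD y 0)
        = if (x, y) ∈ S then pvOut g bg hN wN x y else (g.getD x []).getD y 0) := by
    intro x y _ _ hne
    by_cases h : (x, y) ∈ S
    · rw [if_pos (List.mem_append_left _ h), if_pos h]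
    · rw [if_neg (fun hm => by rcases (hmemS' x y).1 hm with h' | h'; exacts [h h', hne h']),
        if_neg h]
  split_ifs with hbgc
  · -- write out[r][c] := g[mr][mc]
    refine ⟨by rw [pvMapLen_gset]; exact hsh, ?_, ?_⟩
    · intro x y hx hy
      rw [pvGet_gset out r c gm x y hrin hcin]
      by_cases hxy : x = r ∧ y = c
      · obtain ⟨e1, e2⟩ := hxy; subst e1; subst e2
        rw [if_pos ⟨rfl, rfl⟩, if_pos ((hmemS' x y).2 (Or.inr ⟨rfl, rfl⟩)), hOr]
        rw [ha] at hbgc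
        by_cases hS : (x, y) ∈ S
        · rw [if_pos hS, hOr] at hbgc
          split_ifs at hbgc with hg1
          · exact absurd hbgc hg1
          · push_neg at hg1
            rw [if_neg (by simpa [hg1] using hbgc ▸ hg1)]
        · rw [if_neg hS] at hbgc
          rw [if_neg (by simpa using hbgc)]
      · rw [if_neg hxy, hval x y hx hy, hsame x y hx hy hxy]
    · intro x y hy
      rw [pvGet_gset out r c gm x y hrin hcin, if_neg (by rintro ⟨-, e⟩; omega)]
      exact htail x y hy
  · -- no write: out[r][c] ≠ bg, so it already holds pvOut
    refine ⟨hsh, ?_, htail⟩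
    intro x y hx hy
    by_cases hxy : x = r ∧ y = c
    · obtain ⟨e1, e2⟩ := hxy; subst e1; subst e2
      rw [ha] at hbgc ⊢
      rw [if_pos ((hmemS' x y).2 (Or.inr ⟨rfl, rfl⟩)), hOr]
      by_cases hS : (x, y) ∈ S
      · rw [if_pos hS]
      · rw [if_neg hS] at hbgc ⊢
        rw [if_pos hbgc]
    · rw [hval x y hx hy, hsame x y hx hy hxy]

theorem pvFoldB_inv (g : List (List Int)) (bg : Int) (hN wN : Nat)
    (hh : hN = g.length) (hrow : ∀ row ∈ g, wN ≤ row.length) :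
    ∀ (L : List (Nat × Nat)) (S : List (Nat × Nat)) (out : List (List Int)),
      pvInvB g bg hN wN S out → (∀ p ∈ L, p.1 < hN ∧ p.2 < wN) →
      pvInvB g bg hN wN (S ++ L)
        (L.foldl (fun out p => pvStepB g bg (hN : Int) (wN : Int) out (p.1 : Int) (p.2 : Int)) out) := by
  intro L
  induction L with
  | nil => intro S out h _; simpa using h
  | cons p L ih =>
    intro S out hInv hvalid
    have h1 := pvStepB_inv g bg hN wN hh hrow S out hInv p.1 p.2
      (hvalid p (by simp)).1 (hvalid p (by simp)).2
    have h2 := ih (S ++ [(p.1, p.2)]) _ h1 (fun q hq => hvalid q (by simp [hq]))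
    simpa using h2

-- ===== VERDICT (by name: the statement is the Claim_ definition above) =====
set_option maxHeartbeats 2000000 in
theorem sym_center_point_spec : Claim_equal_sym_center_point := by
  intro g _ hPre
  obtain ⟨hex, hlenrow⟩ := hPre
  have hne : g ≠ [] := by
    rintro rfl
    simp at hex
  unfold Spec_sym_center_point
  obtain ⟨bg, hbg⟩ := pvBg?_isSome g hex
  have hg0 : PySem.List.pyGet? g 0 = some (g.headD []) := by
    rw [PySem.List.pyGet?_zero]
    cases g with
    | nil => exact absurd rfl hne
    | cons a t => rfl
  rw [sym_center_point, sym_center_point_alt, hbg, hg0]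
  dsimp only
  set hN := g.length with hhN
  set wN := (g.headD []).length with hwN
  set L := (List.range hN).flatMap (fun r => (List.range wN).map (fun c => (r, c))) with hL
  have hLvalid : ∀ p ∈ L, p.1 < hN ∧ p.2 < wN := by
    intro p hp
    simp only [hL, List.mem_flatMap, List.mem_map, List.mem_range] at hp
    obtain ⟨r, hr, c, hc, hpc⟩ := hp
    subst hpc
    exact ⟨hr, hc⟩
  have hPmem : ∀ x y : Nat, x < hN → y < wN → (x, y) ∈ L := by
    intro x y hx hy
    simp only [hL, List.mem_flatMap, List.mem_map, List.mem_range]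
    exact ⟨x, hx, y, hy, rfl⟩
  -- A's double loop as one fold over the index pairs
  have hA : (PySem.List.pyRange 0 (hN : Int) 1).foldl (fun res r =>
        (PySem.List.pyRange 0 (wN : Int) 1).foldl
          (fun res c => pvStepA bg (hN : Int) (wN : Int) res r c) res) g =
      L.foldl (fun res p => pvStepA bg (hN : Int) (wN : Int) res (p.1 : Int) (p.2 : Int)) g := by
    rw [hL, List.foldl_flatMap]
    simp only [PySem.List.pyRange_zero_natCast, List.foldl_map]
  -- B's double loop likewise
  have hB : (PySem.List.pyRange 0 (hN : Int) 1).foldl (fun out r =>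
        (PySem.List.pyRange 0 (wN : Int) 1).foldl
          (fun out c => pvStepB g bg (hN : Int) (wN : Int) out r c) out) g =
      L.foldl (fun out p => pvStepB g bg (hN : Int) (wN : Int) out (p.1 : Int) (p.2 : Int)) g := by
    rw [hL, List.foldl_flatMap]
    simp only [PySem.List.pyRange_zero_natCast, List.foldl_map]
  rw [hA, hB]
  have hbaseA : pvInv g bg hN wN [] g := by
    refine ⟨rfl, ?_, fun x y _ => rfl⟩
    intro r c _ _
    simp
  have hbaseB : pvInvB g bg hN wN [] g := by
    refine ⟨rfl, ?_, fun x y _ => rfl⟩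
    intro r c _ _
    simp
  obtain ⟨hshA, hvalA, htailA⟩ := by
    have h := pvFold_inv g bg hN wN rfl hlenrow L [] g hbaseA hLvalid
    rwa [List.nil_append] at h
  obtain ⟨hshB, hvalB, htailB⟩ := by
    have h := pvFoldB_inv g bg hN wN rfl hlenrow L [] g hbaseB hLvalid
    rwa [List.nil_append] at h
  set A := L.foldl (fun res p => pvStepA bg (hN : Int) (wN : Int) res (p.1 : Int) (p.2 : Int)) g
  set B := L.foldl (fun out p => pvStepB g bg (hN : Int) (wN : Int) out (p.1 : Int) (p.2 : Int)) g
  have hAlen : A.length = hN := by simpa using congrArg List.length hshA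
  have hBlen : B.length = hN := by simpa using congrArg List.length hshB
  have hrlA : ∀ x : Nat, (A.getD x []).length = (g.getD x []).length :=
    fun x => pvRowLen g A hshA x
  have hrlB : ∀ x : Nat, (B.getD x []).length = (g.getD x []).length :=
    fun x => pvRowLen g B hshB x
  -- both results agree cell by cell: pvOut on the mirrored band, g's value on the tail
  apply List.ext_getElem
  · omega
  · intro i hi1 hi2
    have hiN : i < hN := by omega
    apply List.ext_getElem
    · have h1 := hrlA i
      have h2 := hrlB i
      rw [List.getD_eq_getElem A [] hi1] at h1
      rw [List.getD_eq_getElem B [] hi2] at h2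
      omega
    · intro j hj1 hj2
      have hcell : ∀ (res : List (List Int)) (hlen : i < res.length)
          (hj : j < (res[i]'hlen).length)
          (hv : ∀ x y : Nat, x < hN → y < wN → (res.getD x []).getD y 0 =
            if (x, y) ∈ L then pvOut g bg hN wN x y else (g.getD x []).getD y 0)
          (ht : ∀ x y : Nat, wN ≤ y → (res.getD x []).getD y 0 = (g.getD x []).getD y 0),
          (res[i]'hlen)[j]'hj =
            if j < wN then pvOut g bg hN wN i j else (g.getD i []).getD j 0 := by
        intro res hlen hj hv ht
        by_cases hjw : j < wN
        · rw [if_pos hjw]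
          have h := hv i j hiN hjw
          rw [if_pos (hPmem i j hiN hjw), List.getD_eq_getElem res [] hlen,
              List.getD_eq_getElem _ 0 hj] at h
          exact h
        · rw [if_neg hjw]
          have h := ht i j (by omega)
          rw [List.getD_eq_getElem res [] hlen, List.getD_eq_getElem _ 0 hj] at h
          exact h
      rw [hcell A hi1 hj1 (fun x y hx hy => (hvalA x y hx hy).trans (by
            by_cases h : (x, y) ∈ L ∨ (hN - 1 - x, wN - 1 - y) ∈ L
            · rw [if_pos h, if_pos]
              rcases h with h | h
              · exact h
              · exact hPmem x y hx hy
            · rw [if_neg h, if_neg (fun hm => h (Or.inl hm))])) htailA,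
          hcell B hi2 hj2 hvalB htailB]
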